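-- pv_equiv track=rewrite | github.com/Miladiouss/MixedRadix | MixedRadix.py | __computeDigits
-- ===== SOURCE A (Python) =====
-- def __computeDigits(val, radix):
--     assert isinstance(val, int), 'val is not an integer'
--     digitsR = []
--     radixR  = radix[::-1]
--     for i, r in enumerate(radixR):
--         digitsR.append(val %  r)
--         val = val // r
--     return digitsR[::-1]
-- ===== SOURCE B (Python) =====
-- def __computeDigits(val, radix):
--     assert isinstance(val, int), 'val is not an integer'
--     # table of chained quotients: quots[k] = val floor-divided by the last k radixes
--     quots = [val]
--     q = val
--     for r in reversed(radix):
--         q = q // r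
--         quots.append(q)
--     n = len(radix)
--     # each digit read independently from the table, in forward order (no reversal)
--     return [quots[n - 1 - i] % r for i, r in enumerate(radix)]
-- ===== Notes on version B (the rewrite author's own statement) =====
-- stated objective: alternative
-- what changed: Replaces A's running-remainder loop over the reversed radix list plus two list reversals by building a table of chained quotients in one backward pass and then reading each digit independently in forward order (quots[n-1-i] % radix[i]), so the output is produced front-to-back with no reversal.
import Mathlib
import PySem

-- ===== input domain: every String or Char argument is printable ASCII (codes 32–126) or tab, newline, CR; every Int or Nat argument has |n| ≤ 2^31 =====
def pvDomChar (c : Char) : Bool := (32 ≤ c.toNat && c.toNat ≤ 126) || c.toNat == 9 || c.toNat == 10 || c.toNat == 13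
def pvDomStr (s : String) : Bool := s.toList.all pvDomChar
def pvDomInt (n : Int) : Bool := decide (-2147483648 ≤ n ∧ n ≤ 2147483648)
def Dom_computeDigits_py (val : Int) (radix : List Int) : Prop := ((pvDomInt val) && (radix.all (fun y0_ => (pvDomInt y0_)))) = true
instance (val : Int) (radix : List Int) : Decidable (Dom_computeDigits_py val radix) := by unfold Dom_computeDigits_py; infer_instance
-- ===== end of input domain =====

-- B replaces A's running-remainder loop plus two list reversals by a precomputed
-- table of chained quotients and an independent forward read of each digit (objective: alternative).

-- ===== PORT A =====
def computeDigits_py (val : Int) (radix : List Int) : List Int :=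
  -- digitsR = []; radixR = radix[::-1]
  let radixR := (PySem.List.slice? radix none none (-1)).getD []
  -- for i, r in enumerate(radixR): digitsR.append(val % r); val = val // r
  let st := (PySem.List.enumerate radixR 0).foldl
      (fun (p : List Int × Int) ir =>
        (p.1 ++ [PySem.Int.mod p.2 ir.2], PySem.Int.floordiv p.2 ir.2))
      ([], val)
  -- return digitsR[::-1]
  (PySem.List.slice? st.1 none none (-1)).getD []

-- ===== PORT B =====
def computeDigits_py_alt (val : Int) (radix : List Int) : List Int :=
  -- quots = [val]; q = val; for r in reversed(radix): q = q // r; quots.append(q)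
  let p := radix.reverse.foldl
      (fun (p : List Int × Int) r =>
        let q := PySem.Int.floordiv p.2 r
        (p.1 ++ [q], q))
      ([val], val)
  let n : Int := radix.length
  -- [quots[n - 1 - i] % r for i, r in enumerate(radix)]
  (PySem.List.enumerate radix 0).map
    (fun ir => PySem.Int.mod (PySem.List.pyGetD p.1 (n - 1 - ir.1) 0) ir.2)

-- ===== PRECONDITION & SPEC =====
-- Pre_ excludes exactly the inputs where Python A raises ZeroDivisionError (a zero radix entry).
def Pre_computeDigits_py (val : Int) (radix : List Int) : Prop := 0 ∉ radix
instance (val : Int) (radix : List Int) : Decidable (Pre_computeDigits_py val radix) := by unfold Pre_computeDigits_py; infer_instance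
def pvWitness_computeDigits_py : Int × List Int := (11, [2, 3, 4])

def Spec_computeDigits_py (val : Int) (radix : List Int) (out : List Int) : Prop := out = computeDigits_py_alt val radix
instance (val : Int) (radix : List Int) (out : List Int) : Decidable (Spec_computeDigits_py val radix out) := by unfold Spec_computeDigits_py; infer_instance

-- ===== CLAIM (what is proved, stated in full; the proofs are below) =====
def Claim_equal_computeDigits_py : Prop := ∀ (val : Int) (radix : List Int), Dom_computeDigits_py val radix → Pre_computeDigits_py val radix → Spec_computeDigits_py val radix (computeDigits_py val radix)

-- ===== LEMMAS AND PROOFS =====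

/-- A's loop, as a structural recursion: digits of the reversed radix list, least first. -/
def pvDigR (v : Int) : List Int → List Int
  | [] => []
  | r :: t => PySem.Int.mod v r :: pvDigR (PySem.Int.floordiv v r) t

/-- The chained floor-quotient of `v` by the entries of a list, in order. -/
def pvChain (v : Int) : List Int → Int
  | [] => v
  | r :: t => pvChain (PySem.Int.floordiv v r) t

/-- B's quotient table, as a structural recursion. -/
def pvQList (v : Int) : List Int → List Int
  | [] => [v]
  | r :: t => v :: pvQList (PySem.Int.floordiv v r) t

theorem pvA_foldl (rrs : List Int) : ∀ (v : Int) (acc : List Int) (s : Int),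
    (PySem.List.enumerate rrs s).foldl
      (fun (p : List Int × Int) ir =>
        (p.1 ++ [PySem.Int.mod p.2 ir.2], PySem.Int.floordiv p.2 ir.2))
      (acc, v)
    = (acc ++ pvDigR v rrs, pvChain v rrs) := by
  induction rrs with
  | nil => intro v acc s; simp [PySem.List.enumerate_nil, pvDigR, pvChain]
  | cons r t ih =>
      intro v acc s
      simp only [PySem.List.enumerate_cons, List.foldl_cons, pvDigR, pvChain]
      rw [ih]
      simp

theorem pvB_foldl (rrs : List Int) : ∀ (q : Int) (acc : List Int),
    rrs.foldl
      (fun (p : List Int × Int) r =>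
        (p.1 ++ [PySem.Int.floordiv p.2 r], PySem.Int.floordiv p.2 r))
      (acc ++ [q], q)
    = (acc ++ pvQList q rrs, pvChain q rrs) := by
  induction rrs with
  | nil => intro q acc; simp [pvQList, pvChain]
  | cons r t ih =>
      intro q acc
      simp only [List.foldl_cons, pvQList, pvChain]
      have := ih (PySem.Int.floordiv q r) (acc ++ [q])
      simpa using this

theorem pvDigR_length (rrs : List Int) : ∀ v, (pvDigR v rrs).length = rrs.length := by
  induction rrs with
  | nil => intro v; rfl
  | cons r t ih => intro v; simp [pvDigR, ih]

theorem pvDigR_getElem (rrs : List Int) : ∀ (v : Int) (j : Nat) (hj : j < rrs.length),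
    (pvDigR v rrs)[j]'(by rw [pvDigR_length]; exact hj)
      = PySem.Int.mod (pvChain v (rrs.take j)) (rrs[j]'hj) := by
  induction rrs with
  | nil => intro v j hj; simp at hj
  | cons r t ih =>
      intro v j hj
      cases j with
      | zero => simp [pvDigR, pvChain]
      | succ k => simpa [pvDigR, pvChain] using ih (PySem.Int.floordiv v r) k (by simpa using hj)

theorem pvQList_getD (rrs : List Int) : ∀ (v : Int) (j : Nat), j ≤ rrs.length →
    (pvQList v rrs).getD j 0 = pvChain v (rrs.take j) := by
  induction rrs with
  | nil =>
      intro v j hj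
      have hz : j = 0 := Nat.le_zero.mp hj
      subst hz
      simp [pvQList, pvChain]
  | cons r t ih =>
      intro v j hj
      cases j with
      | zero => simp [pvQList, pvChain]
      | succ k => simpa [pvQList, pvChain] using ih (PySem.Int.floordiv v r) k (by simpa using hj)

-- ===== VERDICT (by name: the statement is the Claim_ definition above) =====
theorem computeDigits_py_spec : Claim_equal_computeDigits_py := by
  intro val radix _ _
  unfold Spec_computeDigits_py computeDigits_py computeDigits_py_alt
  simp only [PySem.List.slice?_none_none_neg_one, Option.getD_some]
  rw [pvA_foldl]
  have hB := pvB_foldl radix.reverse val []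
  simp only [List.nil_append] at hB
  rw [hB]
  simp only [List.nil_append]
  apply List.ext_getElem
  · simp [pvDigR_length, PySem.List.length_enumerate]
  · intro i h1 h2
    have hi : i < radix.length := by
      simpa [PySem.List.length_enumerate] using h2
    rw [List.getElem_map]
    have hgi : (PySem.List.enumerate radix 0)[i]'(by simpa [PySem.List.length_enumerate] using hi)
        = ((i : Int), radix[i]'hi) := by
      simpa using PySem.List.getElem_enumerate (xs := radix) (s := 0) (k := i) (by simpa [PySem.List.length_enumerate] using hi)
    rw [hgi]
    have hrev : (pvDigR val radix.reverse).reverse[i]'h1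
        = (pvDigR val radix.reverse)[(pvDigR val radix.reverse).length - 1 - i]'(by simp [pvDigR_length]; omega) := by
      rw [List.getElem_reverse]
    have hlen : (pvDigR val radix.reverse).length = radix.length := by
      simp [pvDigR_length]
    have hidx : (pvDigR val radix.reverse).length - 1 - i = radix.length - 1 - i := by omega
    have hjr : radix.length - 1 - i < radix.reverse.length := by simp; omega
    rw [hrev]
    simp only [hidx]
    rw [pvDigR_getElem radix.reverse val (radix.length - 1 - i) hjr]
    -- align the Int index with the Nat index
    have hcast : (radix.length : Int) - 1 - (i : Int) = ((radix.length - 1 - i : Nat) : Int) := by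
      omega
    rw [hcast, PySem.List.pyGetD_natCast]
    rw [pvQList_getD radix.reverse val (radix.length - 1 - i) (by simp; omega)]
    congr 1
    rw [List.getElem_reverse]
    congr 1
    omega
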